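-- pv_equiv track=rewrite | github.com/Gabrielcasas002/borrador_segundo_parcial | especificas.py | ocultar_palabras
-- ===== SOURCE A (Python) =====
-- def listar_palabras(palabras_asociadas: list, palabras_descubiertas: list) -> list:
--     """_summary_
--
--     Args:
--         palabras_asociadas (list): Lista de palabras recibida por parametro.
--         palabras_descubiertas (list): Lista de palabras descubiertas por el usuario recibida por parametro.
--
--     Returns:
--         list:
--     """
--
--     palabras_total = []
--
--     for i in range(len(palabras_asociadas)):
--         palabras_total.append(palabras_asociadas[i])
--
--     for i in range(len(palabras_descubiertas)):
--         repetido = False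
--
--         for j in range(len(palabras_total)):
--             if palabras_descubiertas[i] == palabras_total[j]:
--                 repetido = True
--                 break
--
--         if repetido == False:
--             palabras_total.append(palabras_descubiertas[i])
--
--     return palabras_total
--
-- def ocultar_palabras(palabras_asociadas: list, palabras_descubiertas: list) -> list:
--     """_summary_
--
--     Args:
--         palabras_asociadas (list): Lista de palabras recibida por parametro.
--         palabras_descubiertas (list): Lista de palabras decubiertas por el usuario recibida por parametro.
--
--     Returns:
--         list: La funcion retorna una nueva lista modificada utilizando ambas lista. Modifica cada elemento de las listas para agregar "_" a cada indice de los elementos.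
--     """
--
--     palabras_total = listar_palabras(palabras_asociadas, palabras_descubiertas)
--
--     ocultas = []
--
--     for i in range(len(palabras_total)):
--         encontrada = False
--
--         for j in range(len(palabras_descubiertas)):
--             if palabras_total[i] == palabras_descubiertas[j]:
--                 encontrada = True
--                 break
--
--         if encontrada:
--             ocultas.append(palabras_total[i])
--         else:
--             ocultas.append("_" * len(palabras_total[i]))
--
--     return ocultas
-- ===== SOURCE B (Python) =====
-- def ocultar_palabras(palabras_asociadas: list, palabras_descubiertas: list) -> list:
--     # Build the output directly: mask asociadas in one pass, then append the
--     # genuinely new descubiertas, deduplicating with a running 'seen' list.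
--     ocultas = []
--     for w in palabras_asociadas:
--         if w in palabras_descubiertas:
--             ocultas.append(w)
--         else:
--             ocultas.append('_' * len(w))
--     seen = list(palabras_asociadas)
--     for w in palabras_descubiertas:
--         if w not in seen:
--             ocultas.append(w)
--             seen.append(w)
--     return ocultas
-- ===== Notes on version B (the rewrite author's own statement) =====
-- stated objective: faster
-- what changed: B never builds and re-scans the merged list: one pass masks the asociadas words directly and a second pass with a running 'seen' list appends only the new descubiertas words, removing A's quadratic inner scan over the growing merged list at masking time.
import Mathlib
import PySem

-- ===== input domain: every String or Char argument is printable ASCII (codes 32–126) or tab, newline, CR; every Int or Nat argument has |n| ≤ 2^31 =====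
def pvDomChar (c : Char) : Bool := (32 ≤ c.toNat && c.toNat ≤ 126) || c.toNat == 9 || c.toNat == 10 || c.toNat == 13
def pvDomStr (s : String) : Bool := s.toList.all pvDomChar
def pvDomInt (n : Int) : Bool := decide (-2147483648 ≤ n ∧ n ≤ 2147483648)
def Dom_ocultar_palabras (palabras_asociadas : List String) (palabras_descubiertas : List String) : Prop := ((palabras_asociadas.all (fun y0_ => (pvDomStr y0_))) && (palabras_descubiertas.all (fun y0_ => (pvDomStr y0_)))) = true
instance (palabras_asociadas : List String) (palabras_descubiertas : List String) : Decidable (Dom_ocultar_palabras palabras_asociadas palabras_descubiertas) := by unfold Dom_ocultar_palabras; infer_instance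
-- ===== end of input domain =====

-- B builds the output directly (mask asociadas in one pass, then append the new descubiertas
-- with a running seen list) instead of A's merged-list-then-rescan; same return value.

-- '_' * len(w): exact hand port of Python string repetition of a single char
def pvMask (w : String) : String := String.ofList (List.replicate w.toList.length '_')

-- ===== PORT A =====
-- helper listar_palabras, transliterated (index loops over ranges, inner scan with a bool flag)
def listar_palabras (palabras_asociadas : List String) (palabras_descubiertas : List String) : List String :=
  let palabras_total :=
    (PySem.List.pyRange 0 palabras_asociadas.length 1).foldl
      (fun t i => t ++ [PySem.List.pyGetD palabras_asociadas i ""]) []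
  (PySem.List.pyRange 0 palabras_descubiertas.length 1).foldl
    (fun t i =>
      let repetido :=
        (PySem.List.pyRange 0 t.length 1).foldl
          (fun r j =>
            if PySem.List.pyGetD palabras_descubiertas i "" == PySem.List.pyGetD t j "" then true
            else r) false
      if repetido == false then t ++ [PySem.List.pyGetD palabras_descubiertas i ""] else t)
    palabras_total

def ocultar_palabras (palabras_asociadas : List String) (palabras_descubiertas : List String) : List String :=
  let palabras_total := listar_palabras palabras_asociadas palabras_descubiertas
  (PySem.List.pyRange 0 palabras_total.length 1).foldl
    (fun ocultas i =>
      let encontrada :=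
        (PySem.List.pyRange 0 palabras_descubiertas.length 1).foldl
          (fun e j =>
            if PySem.List.pyGetD palabras_total i "" == PySem.List.pyGetD palabras_descubiertas j "" then true
            else e) false
      if encontrada then ocultas ++ [PySem.List.pyGetD palabras_total i ""]
      else ocultas ++ [pvMask (PySem.List.pyGetD palabras_total i "")]) []

-- ===== PORT B =====
def ocultar_palabras_alt (palabras_asociadas : List String) (palabras_descubiertas : List String) : List String :=
  let ocultas :=
    palabras_asociadas.foldl
      (fun o w => if w ∈ palabras_descubiertas then o ++ [w] else o ++ [pvMask w]) []
  let p :=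
    palabras_descubiertas.foldl
      (fun (p : List String × List String) w =>
        if w ∈ p.2 then p else (p.1 ++ [w], p.2 ++ [w]))
      (ocultas, palabras_asociadas)
  p.1

-- ===== PRECONDITION & SPEC =====
def Spec_ocultar_palabras (palabras_asociadas : List String) (palabras_descubiertas : List String) (out : List String) : Prop := out = ocultar_palabras_alt palabras_asociadas palabras_descubiertas
instance (palabras_asociadas : List String) (palabras_descubiertas : List String) (out : List String) : Decidable (Spec_ocultar_palabras palabras_asociadas palabras_descubiertas out) := by unfold Spec_ocultar_palabras; infer_instance

-- ===== CLAIM (what is proved, stated in full; the proofs are below) =====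
def Claim_equal_ocultar_palabras : Prop := ∀ (palabras_asociadas : List String) (palabras_descubiertas : List String), Dom_ocultar_palabras palabras_asociadas palabras_descubiertas → Spec_ocultar_palabras palabras_asociadas palabras_descubiertas (ocultar_palabras palabras_asociadas palabras_descubiertas)

-- ===== LEMMAS AND PROOFS =====

-- A's inner scan with a bool flag computes membership
lemma scan_eq_contains (x : String) (l : List String) (b : Bool) :
    l.foldl (fun r y => if x == y then true else r) b = (b || l.contains x) := by
  induction l generalizing b with
  | nil => simp
  | cons y ys ih =>
      simp only [List.foldl_cons, List.contains_cons, ih]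
      by_cases h : x == y <;> simp [h]

-- the fused second loop of B tracks exactly A's merge loop, mapped through f
lemma fused_loop (f : String → String) :
    ∀ (l s : List String), (∀ w ∈ l, f w = w) →
    (l.foldl (fun (p : List String × List String) w =>
        if w ∈ p.2 then p else (p.1 ++ [w], p.2 ++ [w])) (s.map f, s)).1
      = (l.foldl (fun t w => if w ∈ t then t else t ++ [w]) s).map f := by
  intro l
  induction l with
  | nil => intro s _; simp
  | cons w ws ih =>
      intro s h
      simp only [List.foldl_cons]
      by_cases hw : w ∈ s
      · simp only [if_pos hw]
        exact ih s (fun v hv => h v (List.mem_cons_of_mem _ hv))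
      · simp only [if_neg hw]
        have hfw : f w = w := h w (List.mem_cons_self ..)
        have : (s.map f) ++ [w] = (s ++ [w]).map f := by simp [hfw]
        rw [this]
        exact ih (s ++ [w]) (fun v hv => h v (List.mem_cons_of_mem _ hv))

-- A's merge helper in closed loop form
lemma listar_eq (pa pd : List String) :
    listar_palabras pa pd
      = pd.foldl (fun t w => if w ∈ t then t else t ++ [w]) pa := by
  unfold listar_palabras
  rw [PySem.List.foldl_pyRange_zero_pyGetD' pa "" (fun t w => t ++ [w]) []]
  rw [PySem.List.foldl_append_singleton_eq_self, List.nil_append]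
  rw [PySem.List.foldl_pyRange_zero_pyGetD' pd ""
    (fun t w =>
      if ((PySem.List.pyRange 0 (t.length : Int) 1).foldl
            (fun r j => if w == PySem.List.pyGetD t j "" then true else r) false) == false
      then t ++ [w] else t) pa]
  apply PySem.List.foldl_congr_mem
  intro t w _
  rw [PySem.List.foldl_pyRange_zero_pyGetD' t "" (fun r y => if w == y then true else r) false]
  rw [scan_eq_contains]
  by_cases h : w ∈ t
  · simp [h]
  · simp [h]

-- ===== VERDICT (by name: the statement is the Claim_ definition above) =====
theorem ocultar_palabras_spec : Claim_equal_ocultar_palabras := by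
  intro pa pd _
  unfold Spec_ocultar_palabras ocultar_palabras ocultar_palabras_alt
  set f : String → String := fun w => if w ∈ pd then w else pvMask w with hf
  set merged := listar_palabras pa pd with hm
  -- A's masking loop = merged.map f
  rw [PySem.List.foldl_pyRange_zero_pyGetD' merged ""
    (fun ocultas w =>
      if ((PySem.List.pyRange 0 (pd.length : Int) 1).foldl
            (fun e j => if w == PySem.List.pyGetD pd j "" then true else e) false)
      then ocultas ++ [w] else ocultas ++ [pvMask w]) []]
  have hA : merged.foldl
      (fun ocultas w =>
        if ((PySem.List.pyRange 0 (pd.length : Int) 1).foldl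
              (fun e j => if w == PySem.List.pyGetD pd j "" then true else e) false)
        then ocultas ++ [w] else ocultas ++ [pvMask w]) []
      = merged.foldl (fun o w => o ++ [f w]) [] := by
    apply PySem.List.foldl_congr_mem
    intro o w _
    rw [PySem.List.foldl_pyRange_zero_pyGetD' pd "" (fun e y => if w == y then true else e) false]
    rw [scan_eq_contains]
    by_cases h : w ∈ pd <;> simp [hf, h]
  rw [hA, PySem.List.foldl_append_singleton_eq_map, List.nil_append]
  -- B's first loop = pa.map f
  have hB1 : pa.foldl (fun o w => if w ∈ pd then o ++ [w] else o ++ [pvMask w]) []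
      = pa.map f := by
    have : pa.foldl (fun o w => if w ∈ pd then o ++ [w] else o ++ [pvMask w]) []
        = pa.foldl (fun o w => o ++ [f w]) [] := by
      apply PySem.List.foldl_congr_mem
      intro o w _
      by_cases h : w ∈ pd <;> simp [hf, h]
    rw [this, PySem.List.foldl_append_singleton_eq_map, List.nil_append]
  rw [hB1, hm.trans (listar_eq pa pd)]
  -- fused loop lemma: f is the identity on everything the merge loop can add
  exact (fused_loop f pd pa (fun w hw => by simp [hf, hw])).symm
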